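-- pv_equiv track=rewrite | github.com/koking0/Algorithm | LeetCode/Problems/1640. Check Array Formation Through Concatenation/code.py | canFormArray
-- ===== SOURCE A (Python) =====
-- from typing import List
--
-- def canFormArray(arr: List[int], pieces: List[List[int]]) -> bool:
--     arrIndex = 0
--     while arrIndex < len(arr):
--         for piece in pieces:
--             if arr[arrIndex] == piece[0] and arr[arrIndex: arrIndex + len(piece)] == piece:
--                 arrIndex += len(piece)
--                 break
--         else:
--             return False
--     return True
-- ===== SOURCE B (Python) =====
-- def canFormArray(arr, pieces):
--     # Phase 1: index pieces by first element; phase 2: precompute, for EVERY index i,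
--     # the successor index after matching the first bucket piece that fits at i (or None);
--     # phase 3: follow the successor chain from 0.
--     n = len(arr)
--     buckets = {}
--     for p in pieces:
--         buckets.setdefault(p[0], []).append(p)
--     nxt = []
--     for i in range(n):
--         step = None
--         for p in buckets.get(arr[i], []):
--             if arr[i:i + len(p)] == p:
--                 step = i + len(p)
--                 break
--         nxt.append(step)
--     i = 0
--     while i < n:
--         if nxt[i] is None:
--             return False
--         i = nxt[i]
--     return True
-- ===== Notes on version B (the rewrite author's own statement) =====
-- stated objective: alternative
-- what changed: B is a three-phase algorithm: it indexes pieces by first element, then precomputes a successor table nxt[i] for EVERY index i of arr (the index reached after matching the first fitting piece at i), and finally answers by chasing the successor chain from 0; A instead interleaves a single while-loop over visited indices with a rescan of the whole pieces list at each step.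
-- outside the precondition, e.g. on canFormArray([], [[]]): A returns True, B raises IndexError; on canFormArray([1], [[1], []]): A returns True, B raises IndexError
import Mathlib
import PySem

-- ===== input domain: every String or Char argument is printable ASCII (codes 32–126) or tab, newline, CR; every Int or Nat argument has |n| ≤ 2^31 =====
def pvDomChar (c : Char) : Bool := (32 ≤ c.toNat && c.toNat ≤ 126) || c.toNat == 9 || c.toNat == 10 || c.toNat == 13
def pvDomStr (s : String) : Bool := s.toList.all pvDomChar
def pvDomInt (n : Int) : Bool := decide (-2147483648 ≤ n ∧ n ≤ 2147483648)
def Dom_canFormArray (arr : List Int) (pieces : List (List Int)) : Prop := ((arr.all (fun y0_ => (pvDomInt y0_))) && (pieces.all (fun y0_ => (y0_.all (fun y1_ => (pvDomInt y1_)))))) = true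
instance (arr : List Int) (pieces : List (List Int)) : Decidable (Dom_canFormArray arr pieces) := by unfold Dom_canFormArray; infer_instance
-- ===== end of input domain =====

-- B replaces A's interleaved scan with three phases: a dict of pieces keyed by first element, a
-- precomputed successor table over ALL indices of arr, and a chase of the successor chain from 0;
-- equivalence proved for inputs without an empty piece (Python A raises IndexError on piece[0] there).


-- ===== PORT A =====
-- inner 'for piece in pieces: …' with break/else: the first piece matching at index i (none = else branch)
def canFormArray_find (arr : List Int) (i : Nat) : List (List Int) → Option (List Int)
  | [] => none
  | p :: ps =>
    if PySem.List.pyGet? arr (i : Int) = PySem.List.pyGet? p 0 ∧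
        PySem.List.slice arr (some (i : Int)) (some ((i : Int) + (p.length : Int))) = p
    then some p
    else canFormArray_find arr i ps

-- 'while arrIndex < len(arr)' loop; fuel is a totality guard only (arr.length + 1 always suffices under Pre_)
def canFormArray_loop (arr : List Int) (pieces : List (List Int)) : Nat → Nat → Bool
  | 0, _ => false
  | fuel + 1, i =>
    if i < arr.length then
      match canFormArray_find arr i pieces with
      | none => false
      | some p => canFormArray_loop arr pieces fuel (i + p.length)
    else true

def canFormArray (arr : List Int) (pieces : List (List Int)) : Bool :=
  canFormArray_loop arr pieces (arr.length + 1) 0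

-- ===== PORT B =====
-- phase 1: buckets.setdefault(p[0], []).append(p)
def canFormArray_alt_build (pieces : List (List Int)) : PySem.Dict Int (List (List Int)) :=
  pieces.foldl (fun d p =>
    match PySem.List.pyGet? p 0 with
    | some x => d.modify x [] (· ++ [p])
    | none => d)   -- Python raises IndexError here (piece = []); outside Pre_
    PySem.Dict.empty

-- inner 'for p in buckets.get(arr[i], []): …' with break: the successor index, or none
def canFormArray_alt_first (arr : List Int) (i : Nat) : List (List Int) → Option Nat
  | [] => none
  | p :: ps =>
    if PySem.List.slice arr (some (i : Int)) (some ((i : Int) + (p.length : Int))) = p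
    then some (i + p.length)
    else canFormArray_alt_first arr i ps

-- phase 2: 'for i in range(n): … nxt.append(step)' — the successor table over all indices
def canFormArray_alt_nxt (arr : List Int) (d : PySem.Dict Int (List (List Int))) : List (Option Nat) :=
  (List.range arr.length).map (fun i =>
    canFormArray_alt_first arr i (d.getD (PySem.List.pyGetD arr (i : Int) 0) []))

-- phase 3: 'while i < n: …' chasing the chain; fuel is a totality guard only
def canFormArray_alt_chase (nxt : List (Option Nat)) (n : Nat) : Nat → Nat → Bool
  | 0, _ => false
  | fuel + 1, i =>
    if i < n then
      match nxt[i]? with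
      | some (some j) => canFormArray_alt_chase nxt n fuel j
      | _ => false
    else true

def canFormArray_alt (arr : List Int) (pieces : List (List Int)) : Bool :=
  canFormArray_alt_chase (canFormArray_alt_nxt arr (canFormArray_alt_build pieces))
    arr.length (arr.length + 1) 0

-- ===== PRECONDITION & SPEC =====
-- Pre_ excludes inputs with an empty piece in pieces: Python A raises IndexError on piece[0] when the
-- scan reaches it (and B always raises while building its index); on the few such inputs where A
-- happens to return before reaching the empty piece, B still raises, so they must be excluded.
def Pre_canFormArray (arr : List Int) (pieces : List (List Int)) : Prop := pieces.all (fun p => !p.isEmpty) = true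
instance (arr : List Int) (pieces : List (List Int)) : Decidable (Pre_canFormArray arr pieces) := by unfold Pre_canFormArray; infer_instance
def pvWitness_canFormArray : List Int × List (List Int) := ([1, 2, 3, 4], [[3, 4], [1, 2]])

def Spec_canFormArray (arr : List Int) (pieces : List (List Int)) (out : Bool) : Prop := out = canFormArray_alt arr pieces
instance (arr : List Int) (pieces : List (List Int)) (out : Bool) : Decidable (Spec_canFormArray arr pieces out) := by unfold Spec_canFormArray; infer_instance

-- ===== CLAIM (what is proved, stated in full; the proofs are below) =====
def Claim_equal_canFormArray : Prop := ∀ (arr : List Int) (pieces : List (List Int)), Dom_canFormArray arr pieces → Pre_canFormArray arr pieces → Spec_canFormArray arr pieces (canFormArray arr pieces)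

-- ===== LEMMAS AND PROOFS =====

-- B's bucket for key x lists exactly the pieces whose first element is x, in order
theorem pvBucket_aux (x : Int) :
    ∀ (ps : List (List Int)) (d : PySem.Dict Int (List (List Int))),
      (ps.foldl (fun d p =>
        match PySem.List.pyGet? p 0 with
        | some y => d.modify y [] (· ++ [p])
        | none => d) d).getD x []
      = d.getD x [] ++ ps.filter (fun p => decide (PySem.List.pyGet? p 0 = some x)) := by
  intro ps
  induction ps with
  | nil => intro d; simp
  | cons p ps ih =>
    intro d
    cases hp : PySem.List.pyGet? p 0 with
    | none =>
      simp only [List.foldl_cons, hp]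
      rw [ih d, List.filter_cons]
      simp [hp]
    | some y =>
      simp only [List.foldl_cons, hp]
      rw [ih]
      by_cases hxy : x = y
      · subst hxy
        rw [PySem.Dict.getD_modify_self, List.filter_cons]
        simp [hp, List.append_assoc]
      · rw [PySem.Dict.getD_modify_of_ne _ _ _ hxy, List.filter_cons]
        have : ¬ (PySem.List.pyGet? p 0 = some x) := by rw [hp]; exact fun h => hxy (Option.some.inj h).symm
        simp [this]

theorem pvBucket (pieces : List (List Int)) (x : Int) :
    (canFormArray_alt_build pieces).getD x []
      = pieces.filter (fun p => decide (PySem.List.pyGet? p 0 = some x)) := by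
  unfold canFormArray_alt_build
  rw [pvBucket_aux x pieces PySem.Dict.empty]
  simp

-- the bucket scan finds exactly the successor of the piece A's scan finds
theorem pvFirst_corr (arr : List Int) (i : Nat) (x : Int)
    (hx : PySem.List.pyGet? arr (i : Int) = some x) :
    ∀ ps : List (List Int),
      canFormArray_alt_first arr i (ps.filter (fun p => decide (PySem.List.pyGet? p 0 = some x)))
        = (canFormArray_find arr i ps).map (fun p => i + p.length) := by
  intro ps
  induction ps with
  | nil => simp [canFormArray_find, canFormArray_alt_first]
  | cons p ps ih =>
    rw [List.filter_cons]
    by_cases hy : PySem.List.pyGet? p 0 = some x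
    · simp only [hy, decide_true, if_true]
      unfold canFormArray_alt_first canFormArray_find
      by_cases hc : PySem.List.slice arr (some (i : Int)) (some ((i : Int) + (p.length : Int))) = p
      · rw [if_pos hc, if_pos ⟨by rw [hx, hy], hc⟩]
        rfl
      · rw [if_neg hc, if_neg (fun h => hc h.2)]
        exact ih
    · simp only [hy, decide_false]
      unfold canFormArray_find
      have hA : ¬ (PySem.List.pyGet? arr ((i : Nat) : Int) = PySem.List.pyGet? p 0 ∧
          PySem.List.slice arr (some (i : Int)) (some ((i : Int) + (p.length : Int))) = p) := by
        intro h
        exact hy (h.1 ▸ hx)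
      rw [if_neg hA]
      exact ih

-- A's while-loop equals B's chain chase, step by step (same fuel, same index)
theorem pvLoop_eq (arr : List Int) (pieces : List (List Int)) :
    ∀ (fuel i : Nat),
      canFormArray_loop arr pieces fuel i
        = canFormArray_alt_chase (canFormArray_alt_nxt arr (canFormArray_alt_build pieces))
            arr.length fuel i := by
  intro fuel
  induction fuel with
  | zero => intro i; rfl
  | succ fuel ih =>
    intro i
    unfold canFormArray_loop canFormArray_alt_chase
    by_cases hi : i < arr.length
    · rw [if_pos hi, if_pos hi]
      have hnxt : (canFormArray_alt_nxt arr (canFormArray_alt_build pieces))[i]?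
          = some (canFormArray_alt_first arr i
              ((canFormArray_alt_build pieces).getD (PySem.List.pyGetD arr (i : Int) 0) [])) := by
        unfold canFormArray_alt_nxt
        rw [List.getElem?_map, List.getElem?_range hi]
        rfl
      have hx : PySem.List.pyGet? arr (i : Int) = some arr[i] := by
        rw [PySem.List.pyGet?_natCast, List.getElem?_eq_getElem hi]
      have hgetD : PySem.List.pyGetD arr ((i : Nat) : Int) 0 = arr[i] := by
        rw [PySem.List.pyGetD_natCast]
        simp [List.getD_eq_getElem?_getD, List.getElem?_eq_getElem hi]
      rw [hnxt, hgetD, pvBucket pieces arr[i], pvFirst_corr arr i arr[i] hx pieces]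
      cases hf : canFormArray_find arr i pieces with
      | none => rfl
      | some p => exact ih (i + p.length)
    · rw [if_neg hi, if_neg hi]

-- ===== VERDICT (by name: the statement is the Claim_ definition above) =====
theorem canFormArray_spec : Claim_equal_canFormArray := by
  intro arr pieces _ _
  unfold Spec_canFormArray canFormArray canFormArray_alt
  exact pvLoop_eq arr pieces (arr.length + 1) 0
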